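-- pv_equiv track=rewrite | github.com/DaemonCypher/Visualization-Project | src/data_analysis/img_processing/svg_divide.py | extract_ranges
-- ===== SOURCE A (Python) =====
-- def extract_ranges(blank_mask):
--     """
--     Given a 1D boolean array blank_mask (True=blank),
--     return list of (start, end) intervals where blank_mask is False.
--     """
--     regions = []
--     in_region = False
--     for i, is_blank in enumerate(blank_mask):
--         if not is_blank and not in_region:
--             start = i
--             in_region = True
--         elif is_blank and in_region:
--             regions.append((start, i))
--             in_region = False
--     if in_region:
--         regions.append((start, len(blank_mask)))
--     return regions
-- ===== SOURCE B (Python) =====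
-- from itertools import groupby
--
-- def extract_ranges(blank_mask):
--     """
--     Given a 1D boolean array blank_mask (True=blank),
--     return list of (start, end) intervals where blank_mask is False.
--     """
--     regions = []
--     for is_blank, group in groupby(enumerate(blank_mask), key=lambda p: bool(p[1])):
--         if not is_blank:
--             members = list(group)
--             regions.append((members[0][0], members[-1][0] + 1))
--     return regions
-- ===== Notes on version B (the rewrite author's own statement) =====
-- stated objective: idiomatic
-- what changed: Replaced the stateful in_region/start flag scan (with a trailing-run fixup after the loop) by run-grouping via itertools.groupby: each maximal False-run is materialized at once and emitted as (first index, last index + 1), so no flag or post-loop branch remains.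
import Mathlib
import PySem

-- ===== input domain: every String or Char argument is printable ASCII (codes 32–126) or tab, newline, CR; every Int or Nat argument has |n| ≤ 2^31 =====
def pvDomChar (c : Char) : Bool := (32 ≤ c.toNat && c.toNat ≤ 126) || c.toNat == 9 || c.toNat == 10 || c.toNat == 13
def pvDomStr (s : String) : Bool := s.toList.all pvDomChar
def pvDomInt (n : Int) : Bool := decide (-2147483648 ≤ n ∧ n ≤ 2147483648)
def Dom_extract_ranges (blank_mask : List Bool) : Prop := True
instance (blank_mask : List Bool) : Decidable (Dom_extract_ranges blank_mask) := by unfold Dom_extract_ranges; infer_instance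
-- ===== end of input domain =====

-- B replaces A's in_region/start flag scan by run-grouping (groupby over the enumerated
-- mask): each maximal False-run is emitted at once as (first index, last index + 1).
-- Objective: idiomatic; same O(n) cost.

-- ===== PORT A =====
-- state: (regions, in_region, start); start initialized arbitrarily (unread while in_region is false)
def extract_ranges (blank_mask : List Bool) : List (Int × Int) :=
  let s := (PySem.List.enumerate blank_mask).foldl
    (fun (st : List (Int × Int) × Bool × Int) (p : Int × Bool) =>
      if !p.2 && !st.2.1 then (st.1, true, p.1)
      else if p.2 && st.2.1 then (st.1 ++ [(st.2.2, p.1)], false, st.2.2)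
      else st)
    ([], false, 0)
  if s.2.1 then s.1 ++ [(s.2.2, (blank_mask.length : Int))] else s.1

-- ===== PORT B =====
-- groupby over enumerate(blank_mask): consume the maximal run of pairs sharing the head's
-- bool; if the key is False emit (first index, last index + 1); skip True groups.
def extract_ranges_alt_go : List (Int × Bool) → List (Int × Int)
  | [] => []
  | p :: rest =>
    let grp := p :: rest.takeWhile (fun q => q.2 == p.2)
    let rest' := rest.dropWhile (fun q => q.2 == p.2)
    if p.2 then extract_ranges_alt_go rest'
    else ((grp.head (by simp [grp])).1, (grp.getLast (by simp [grp])).1 + 1) :: extract_ranges_alt_go rest'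
  termination_by l => l.length
  decreasing_by
    all_goals exact Nat.lt_succ_of_le (List.length_dropWhile_le _ _)

def extract_ranges_alt (blank_mask : List Bool) : List (Int × Int) :=
  extract_ranges_alt_go (PySem.List.enumerate blank_mask)

-- ===== PRECONDITION & SPEC =====
def Spec_extract_ranges (blank_mask : List Bool) (out : List (Int × Int)) : Prop := out = extract_ranges_alt blank_mask
instance (blank_mask : List Bool) (out : List (Int × Int)) : Decidable (Spec_extract_ranges blank_mask out) := by unfold Spec_extract_ranges; infer_instance

-- ===== CLAIM (what is proved, stated in full; the proofs are below) =====
def Claim_equal_extract_ranges : Prop := ∀ (blank_mask : List Bool), Dom_extract_ranges blank_mask → Spec_extract_ranges blank_mask (extract_ranges blank_mask)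

-- ===== LEMMAS AND PROOFS =====

-- one-element-at-a-time state machine shared by both proofs:
-- spec b start i l = intervals emitted on suffix l at position i, currently inside a
-- region started at `start` iff b; start is ignored when b = false.
def specGo : Bool → Int → Int → List Bool → List (Int × Int)
  | false, _, _, [] => []
  | true, s, i, [] => [(s, i)]
  | false, s, i, true :: l => specGo false s (i + 1) l
  | false, _, i, false :: l => specGo true i (i + 1) l
  | true, s, i, false :: l => specGo true s (i + 1) l
  | true, s, i, true :: l => (s, i) :: specGo false s (i + 1) l

theorem specGo_false_start (s s' i : Int) (l : List Bool) :
    specGo false s i l = specGo false s' i l := by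
  induction l generalizing s s' i with
  | nil => rfl
  | cons x l ih =>
    cases x <;> simp only [specGo]
    exact ih _ _ _

theorem specGo_false_skip_true (s i : Int) (l : List Bool) :
    specGo false s i l
      = specGo false s (i + (l.takeWhile (fun b => b == true)).length)
          (l.dropWhile (fun b => b == true)) := by
  induction l generalizing i with
  | nil => simp
  | cons x l ih =>
    cases x with
    | false => simp [List.takeWhile, List.dropWhile]
    | true =>
      simp only [List.takeWhile, List.dropWhile, beq_self_eq_true, List.length_cons, specGo]
      rw [ih]
      congr 1
      push_cast
      ring

theorem specGo_true_close (s i : Int) (l : List Bool) :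
    specGo true s i l
      = (s, i + (l.takeWhile (fun b => b == false)).length)
        :: specGo false s (i + (l.takeWhile (fun b => b == false)).length + 1)
             ((l.dropWhile (fun b => b == false)).drop 1) := by
  induction l generalizing i with
  | nil => simp [specGo]
  | cons x l ih =>
    cases x with
    | true => simp [List.takeWhile, List.dropWhile, specGo]
    | false =>
      simp only [List.takeWhile, List.dropWhile, beq_self_eq_true, List.length_cons, specGo]
      rw [ih]
      have : i + 1 + ((l.takeWhile (fun b => b == false)).length : Int)
          = i + (((l.takeWhile (fun b => b == false)).length : Int) + 1) := by ring
      rw [this]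
      push_cast
      ring_nf

-- enumerate commutes with takeWhile / dropWhile on the second component
theorem enumerate_takeWhile (l : List Bool) (b : Bool) (i : Int) :
    (PySem.List.enumerate l i).takeWhile (fun q => q.2 == b)
      = PySem.List.enumerate (l.takeWhile (fun x => x == b)) i := by
  induction l generalizing i with
  | nil => simp [PySem.List.enumerate_nil]
  | cons x l ih =>
    cases hx : x == b <;>
      simp only [PySem.List.enumerate_cons, List.takeWhile_cons, hx] <;>
      simp [ih, PySem.List.enumerate_cons, PySem.List.enumerate_nil]

theorem enumerate_dropWhile (l : List Bool) (b : Bool) (i : Int) :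
    (PySem.List.enumerate l i).dropWhile (fun q => q.2 == b)
      = PySem.List.enumerate (l.dropWhile (fun x => x == b))
          (i + (l.takeWhile (fun x => x == b)).length) := by
  induction l generalizing i with
  | nil => simp [PySem.List.enumerate_nil]
  | cons x l ih =>
    cases hx : x == b
    · simp [PySem.List.enumerate_cons, hx]
    · simp only [PySem.List.enumerate_cons, List.dropWhile_cons, List.takeWhile_cons, hx,
        if_true, List.length_cons]
      rw [ih]
      congr 1
      push_cast
      ring

theorem dropWhile_head_false {a : Type} (p : a → Bool) (l : List a) (c : a) (r : List a)
    (h : l.dropWhile p = c :: r) : p c = false := by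
  induction l with
  | nil => simp at h
  | cons x l ih =>
    rw [List.dropWhile_cons] at h
    split_ifs at h with hx
    · exact ih h
    · cases h; simpa using hx

theorem getLast?_fst (p : Int × Bool) (l : List Bool) (i : Int) :
    ((p :: PySem.List.enumerate l i).getLast?).map (·.1)
      = some (if l = [] then p.1 else i + (l.length : Int) - 1) := by
  induction l generalizing p i with
  | nil => simp [PySem.List.enumerate_nil]
  | cons x l ih =>
    rw [PySem.List.enumerate_cons, List.getLast?_cons_cons, ih]
    rcases eq_or_ne l [] with rfl | hl
    · simp
    · simp only [hl, if_false, List.cons_ne_nil, List.length_cons, Option.some.injEq]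
      push_cast
      ring

-- B's port computes specGo false
theorem alt_go_eq_specGo (l : List Bool) (i : Int) :
    extract_ranges_alt_go (PySem.List.enumerate l i) = specGo false 0 i l := by
  induction hn : l.length using Nat.strong_induction_on generalizing l i with
  | _ n ih =>
  cases l with
  | nil => simp [PySem.List.enumerate_nil, extract_ranges_alt_go, specGo]
  | cons x l =>
    have hlen : l.length + 1 = n := by simpa using hn
    rw [PySem.List.enumerate_cons, extract_ranges_alt_go]
    cases x with
    | true =>
      simp only [enumerate_dropWhile, if_true]
      rw [ih ((l.dropWhile (fun x => x == true)).length)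
            (by have := List.length_dropWhile_le (fun x => x == true) l; omega) _ _ rfl]
      conv_rhs => rw [show specGo false 0 i (true :: l) = specGo false 0 (i + 1) l from rfl,
        specGo_false_skip_true 0 (i + 1) l]
    | false =>
      simp only [Bool.false_eq_true, if_false, enumerate_dropWhile, enumerate_takeWhile]
      rw [ih ((l.dropWhile (fun x => x == false)).length)
            (by have := List.length_dropWhile_le (fun x => x == false) l; omega) _ _ rfl]
      conv_rhs => rw [show specGo false 0 i (false :: l) = specGo true i (i + 1) l from rfl,
        specGo_true_close]
      have hgl : ∀ (h : ((i, false) :: PySem.List.enumerate (l.takeWhile (fun x => x == false)) (i + 1)) ≠ []),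
          (((i, false) :: PySem.List.enumerate (l.takeWhile (fun x => x == false)) (i + 1)).getLast h).1
            = if l.takeWhile (fun x => x == false) = [] then i
              else i + 1 + ((l.takeWhile (fun x => x == false)).length : Int) - 1 := by
        intro h
        have h1 := getLast?_fst (i, false) (l.takeWhile (fun x => x == false)) (i + 1)
        rw [List.getLast?_eq_some_getLast h] at h1
        simpa using h1
      rw [List.head_cons, hgl]
      rcases hdw : l.dropWhile (fun x => x == false) with _ | ⟨c, r⟩
      · have htw : l.takeWhile (fun x => x == false) = l := by
          have := List.takeWhile_append_dropWhile (p := fun x => x == false) (l := l)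
          rw [hdw] at this; simpa using this
        rw [htw, List.cons.injEq]
        refine ⟨?_, by simp [specGo]⟩
        rcases eq_or_ne l [] with rfl | hl
        · simp
        · simp only [hl, if_false, Prod.mk.injEq, true_and]
          omega
      · have hc : c = true := by
          have := dropWhile_head_false (fun x => x == false) l c r hdw
          simpa using this
        subst hc
        have htwne : l.takeWhile (fun x => x == false) ≠ [] ∨ True := Or.inr trivial
        rw [List.cons.injEq]
        constructor
        · split_ifs with h0
          · simp only [h0, Prod.mk.injEq, List.length_nil, Nat.cast_zero, true_and]
            omega
          · simp only [Prod.mk.injEq, true_and]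
            omega
        · rw [show specGo false 0 (i + 1 + ((l.takeWhile (fun x => x == false)).length : Int)) (true :: r)
              = specGo false 0 (i + 1 + ((l.takeWhile (fun x => x == false)).length : Int) + 1) r from rfl]
          rw [List.drop_one, List.tail_cons]
          exact specGo_false_start _ _ _ _

-- A's port computes specGo false
theorem fold_eq_specGo (l : List Bool) (i : Int) (regions : List (Int × Int)) (b : Bool) (start : Int) :
    (let s := (PySem.List.enumerate l i).foldl
        (fun (st : List (Int × Int) × Bool × Int) (p : Int × Bool) =>
          if !p.2 && !st.2.1 then (st.1, true, p.1)
          else if p.2 && st.2.1 then (st.1 ++ [(st.2.2, p.1)], false, st.2.2)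
          else st)
        (regions, b, start)
      if s.2.1 then s.1 ++ [(s.2.2, i + (l.length : Int))] else s.1)
      = regions ++ specGo b start i l := by
  induction l generalizing i regions b start with
  | nil =>
    cases b <;> simp [PySem.List.enumerate_nil, specGo]
  | cons x l ih =>
    rw [PySem.List.enumerate_cons]
    cases x <;> cases b <;>
      simp only [List.foldl_cons, Bool.not_false, Bool.not_true, Bool.and_self,
        Bool.and_false, Bool.and_true,
        if_true, if_false, Bool.false_eq_true, specGo] <;>
      [skip; skip; skip; skip]
    · -- x = false, b = false : open region at i
      have := ih (i + 1) regions true i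
      simp only [List.length_cons] at *
      rw [show i + ((l.length + 1 : Nat) : Int) = (i + 1) + (l.length : Int) by push_cast; ring]
      exact this
    · -- x = false, b = true : stay in region
      have := ih (i + 1) regions true start
      simp only [List.length_cons] at *
      rw [show i + ((l.length + 1 : Nat) : Int) = (i + 1) + (l.length : Int) by push_cast; ring]
      exact this
    · -- x = true, b = false : stay out
      have := ih (i + 1) regions false start
      simp only [List.length_cons] at *
      rw [show i + ((l.length + 1 : Nat) : Int) = (i + 1) + (l.length : Int) by push_cast; ring]
      exact this
    · -- x = true, b = true : close region
      have := ih (i + 1) (regions ++ [(start, i)]) false start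
      simp only [List.length_cons] at *
      rw [show i + ((l.length + 1 : Nat) : Int) = (i + 1) + (l.length : Int) by push_cast; ring]
      rw [this]
      simp

-- ===== VERDICT (by name: the statement is the Claim_ definition above) =====
theorem extract_ranges_spec : Claim_equal_extract_ranges := by
  intro l _
  show extract_ranges l = extract_ranges_alt l
  unfold extract_ranges extract_ranges_alt
  rw [alt_go_eq_specGo]
  have := fold_eq_specGo l 0 [] false 0
  simpa using this
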